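-- pv_equiv track=rewrite | github.com/willwerj/AMMBER_python | ammber/BinaryLiquid.py | find_local_maxima
-- ===== SOURCE A (Python) =====
-- def find_local_maxima(points):
--     # Function to check if a point is a local minimum
--     def is_gt_prev(index):
--         if index == 0:
--             return False
--         else:
--             return points[index][1] > points[index - 1][1]
--
--     local_maxima = []
--     current_section = []
--
--     for i in range(len(points)):
--         # if higher temp than prev
--         if is_gt_prev(i):
--             current_section = [points[i]]
--         # if current section exists and point is same temp
--         elif current_section and current_section[-1][1] == points[i][1]:
--             current_section.append(points[i])
--         # lower temp and current section exists
--         elif current_section: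
--             local_maxima.append(current_section[int(len(current_section) / 2)])
--             current_section = []
--
--     return local_maxima
-- ===== SOURCE B (Python) =====
-- def find_local_maxima(points):
--     # Collapse points into maximal runs of equal second component, then
--     # emit the midpoint of every run strictly above both neighbouring runs.
--     groups = []
--     for p in points:
--         if groups and groups[-1][-1][1] == p[1]:
--             groups[-1].append(p)
--         else:
--             groups.append([p])
--     out = []
--     for prev, g, nxt in zip(groups, groups[1:], groups[2:]):
--         if prev[0][1] < g[0][1] and nxt[0][1] < g[0][1]:
--             out.append(g[len(g) // 2])
--     return out
-- ===== Notes on version B (the rewrite author's own statement) =====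
-- stated objective: alternative
-- what changed: A's single emit-on-descent state machine is replaced by a two-pass group-then-neighbour-test decomposition: first collapse the points into maximal runs of equal second component, then emit the midpoint of every run whose both neighbouring runs have strictly smaller value.
import Mathlib
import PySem

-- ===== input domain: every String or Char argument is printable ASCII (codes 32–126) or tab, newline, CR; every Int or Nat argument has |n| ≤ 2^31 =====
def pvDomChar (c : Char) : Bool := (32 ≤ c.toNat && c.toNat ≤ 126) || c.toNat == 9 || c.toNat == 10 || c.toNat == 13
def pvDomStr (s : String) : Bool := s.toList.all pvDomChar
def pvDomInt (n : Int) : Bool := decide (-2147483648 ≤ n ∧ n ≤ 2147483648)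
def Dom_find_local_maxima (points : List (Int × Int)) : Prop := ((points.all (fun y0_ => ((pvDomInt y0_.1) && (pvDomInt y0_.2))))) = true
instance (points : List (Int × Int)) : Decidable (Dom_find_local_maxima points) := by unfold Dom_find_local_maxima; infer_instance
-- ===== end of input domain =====

-- B replaces A's emit-on-descent state machine by a group-then-neighbour-test
-- decomposition (collapse into runs of equal value, then test both neighbours);
-- same O(n) cost, objective: alternative decomposition.

-- ===== PORT A =====
def find_local_maxima (points : List (Int × Int)) : List (Int × Int) :=
  let is_gt_prev : Nat → Bool := fun index =>
    if index = 0 then false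
    else decide ((points.getD index (0, 0)).2 > (points.getD (index - 1) (0, 0)).2)
  ((List.range points.length).foldl
    (fun (st : List (Int × Int) × List (Int × Int)) i =>
      if is_gt_prev i then (st.1, [points.getD i (0, 0)])
      else
        match st.2.getLast? with
        | some last =>
            if last.2 = (points.getD i (0, 0)).2 then (st.1, st.2 ++ [points.getD i (0, 0)])
            else (st.1 ++ [st.2.getD (st.2.length / 2) (0, 0)], [])
        | none => st)
    ([], [])).1

-- ===== PORT B =====
-- B-side helper: collapse points into maximal runs of equal second component.
def mkGroups (points : List (Int × Int)) : List (List (Int × Int)) :=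
  points.foldl
    (fun gs p =>
      match gs.getLast? with
      | some g =>
          if (g.getLastD (0, 0)).2 = p.2 then gs.dropLast ++ [g ++ [p]] else gs ++ [[p]]
      | none => [[p]])
    []

def find_local_maxima_alt (points : List (Int × Int)) : List (Int × Int) :=
  let groups := mkGroups points
  ((groups.zip groups.tail).zip groups.tail.tail).filterMap
    (fun t =>
      if (t.1.1.headD (0, 0)).2 < (t.1.2.headD (0, 0)).2 ∧
         (t.2.headD (0, 0)).2 < (t.1.2.headD (0, 0)).2
      then some (t.1.2.getD (t.1.2.length / 2) (0, 0))
      else none)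

-- ===== PRECONDITION & SPEC =====
def Spec_find_local_maxima (points : List (Int × Int)) (out : List (Int × Int)) : Prop := out = find_local_maxima_alt points
instance (points : List (Int × Int)) (out : List (Int × Int)) : Decidable (Spec_find_local_maxima points out) := by unfold Spec_find_local_maxima; infer_instance

-- ===== CLAIM (what is proved, stated in full; the proofs are below) =====
def Claim_equal_find_local_maxima : Prop := ∀ (points : List (Int × Int)), Dom_find_local_maxima points → Spec_find_local_maxima points (find_local_maxima points)

-- ===== LEMMAS AND PROOFS =====

def headVal (g : List (Int × Int)) : Int := (g.headD (0, 0)).2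
def midG (g : List (Int × Int)) : Int × Int := g.getD (g.length / 2) (0, 0)

-- A's loop body as a function of (state, previous point, current point).
def stepA (st : List (Int × Int) × List (Int × Int)) (prev : Option (Int × Int)) (p : Int × Int) :
    List (Int × Int) × List (Int × Int) :=
  if (match prev with | none => false | some q => decide (p.2 > q.2)) then (st.1, [p])
  else
    match st.2.getLast? with
    | some last =>
        if last.2 = p.2 then (st.1, st.2 ++ [p])
        else (st.1 ++ [st.2.getD (st.2.length / 2) (0, 0)], [])
    | none => st

def pairLoop {α β : Type} (f : β → Option α → α → β) : Option α → β → List α → β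
  | _, st, [] => st
  | prev, st, x :: xs => pairLoop f (some x) (f st prev x) xs

-- canonical run decomposition (front recursion)
def grp : List (Int × Int) → List (List (Int × Int))
  | [] => []
  | p :: ps =>
      (p :: ps.takeWhile (fun x => x.2 == p.2)) :: grp (ps.dropWhile (fun x => x.2 == p.2))
  termination_by l => l.length
  decreasing_by
    simp only [List.length_cons]
    exact Nat.lt_succ_of_le (List.length_dropWhile_le _ _)

-- group-level model of A's state machine
def emitRuns (pv : Int) (pending : Option (List (Int × Int))) : List (List (Int × Int)) → List (Int × Int)
  | [] => []
  | g :: gs =>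
      if pv < headVal g then emitRuns (headVal g) (some g) gs
      else (match pending with | some pg => [midG pg] | none => []) ++ emitRuns (headVal g) none gs

-- group-level model of B's neighbour test
def trips : List (List (Int × Int)) → List (Int × Int)
  | a :: b :: c :: rest =>
      (if headVal a < headVal b ∧ headVal c < headVal b then [midG b] else []) ++ trips (b :: c :: rest)
  | _ => []
  termination_by l => l.length

theorem foldl_range_pairLoop {α β : Type} (d : α) (f : β → Option α → α → β) :
    ∀ (xs : List α) (prev : Option α) (st : β),
    (List.range xs.length).foldl
      (fun st i => f st (if i = 0 then prev else some (xs.getD (i - 1) d)) (xs.getD i d)) st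
      = pairLoop f prev st xs := by
  intro xs
  induction xs with
  | nil => intro prev st; simp [pairLoop]
  | cons x t ih =>
    intro prev st
    rw [List.length_cons, List.range_succ_eq_map]
    simp only [List.foldl_cons, List.foldl_map]
    have h1 : (fun (st : β) (i : Nat) =>
        f st (if i + 1 = 0 then prev else some ((x :: t).getD (i + 1 - 1) d)) ((x :: t).getD (i + 1) d))
        = (fun (st : β) (i : Nat) => f st (if i = 0 then some x else some (t.getD (i - 1) d)) (t.getD i d)) := by
      funext st i
      cases i <;> simp
    rw [h1]
    simp only [List.getD_cons_zero]
    exact ih (some x) (f st prev x)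

theorem bridgeA (points : List (Int × Int)) :
    find_local_maxima points = (pairLoop stepA none ([], []) points).1 := by
  have h : (fun (st : List (Int × Int) × List (Int × Int)) (i : Nat) =>
      if (if i = 0 then false
          else decide ((points.getD i (0, 0)).2 > (points.getD (i - 1) (0, 0)).2)) then
        (st.1, [points.getD i (0, 0)])
      else
        match st.2.getLast? with
        | some last =>
            if last.2 = (points.getD i (0, 0)).2 then (st.1, st.2 ++ [points.getD i (0, 0)])
            else (st.1 ++ [st.2.getD (st.2.length / 2) (0, 0)], [])
        | none => st)
      = (fun st i => stepA st (if i = 0 then none else some (points.getD (i - 1) (0, 0)))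
          (points.getD i (0, 0))) := by
    funext st i
    cases i <;> simp [stepA]
  simp only [find_local_maxima]
  rw [h, foldl_range_pairLoop]

theorem runA_append (v : Int) :
    ∀ (r : List (Int × Int)) (rest : List (Int × Int)) (q : Int × Int)
      (lm cs : List (Int × Int)),
      q.2 = v → (∀ x ∈ r, x.2 = v) → cs ≠ [] → (∀ x ∈ cs, x.2 = v) →
      pairLoop stepA (some q) (lm, cs) (r ++ rest)
        = pairLoop stepA (some (r.getLastD q)) (lm, cs ++ r) rest := by
  intro r
  induction r with
  | nil => intro rest q lm cs _ _ _ _; simp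
  | cons x r' ih =>
    intro rest q lm cs hq hr hne hcs
    obtain ⟨l, hl⟩ : ∃ l, cs.getLast? = some l := by
      cases h : cs.getLast? with
      | none => exact absurd (List.getLast?_eq_none_iff.mp h) hne
      | some l => exact ⟨l, rfl⟩
    have hlv : l.2 = v := hcs l (List.mem_of_getLast? hl)
    have hx : x.2 = v := hr x (by simp)
    have step1 : stepA (lm, cs) (some q) x = (lm, cs ++ [x]) := by
      simp only [stepA, hq, hx]
      rw [if_neg (by simp), hl]
      simp [hlv]
    simp only [List.cons_append, pairLoop, step1]
    rw [ih rest x lm (cs ++ [x]) hx (fun y hy => hr y (by simp [hy])) (by simp)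
      (by intro y hy; rcases List.mem_append.mp hy with h | h
          · exact hcs y h
          · simp at h; simp [h, hx])]
    simp [List.getLast?_cons]

theorem runA_skip (v : Int) :
    ∀ (r : List (Int × Int)) (rest : List (Int × Int)) (q : Int × Int) (lm : List (Int × Int)),
      q.2 = v → (∀ x ∈ r, x.2 = v) →
      pairLoop stepA (some q) (lm, []) (r ++ rest)
        = pairLoop stepA (some (r.getLastD q)) (lm, []) rest := by
  intro r
  induction r with
  | nil => intro rest q lm _ _; simp
  | cons x r' ih =>
    intro rest q lm hq hr
    have hx : x.2 = v := hr x (by simp)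
    have step1 : stepA (lm, []) (some q) x = (lm, []) := by
      simp only [stepA, hq, hx]
      rw [if_neg (by simp)]
      simp
    simp only [List.cons_append, pairLoop, step1]
    rw [ih rest x lm hx (fun y hy => hr y (by simp [hy]))]
    simp [List.getLast?_cons]

theorem dropWhile_head_false {α : Type} (f : α → Bool) :
    ∀ (l : List α) (x : α) (t : List α), l.dropWhile f = x :: t → f x = false := by
  intro l
  induction l with
  | nil => intro x t h; simp [List.dropWhile] at h
  | cons a l' ih =>
    intro x t h
    rw [List.dropWhile_cons] at h
    by_cases ha : f a = true
    · rw [if_pos ha] at h; exact ih x t h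
    · rw [if_neg ha] at h
      cases h
      simpa using ha

theorem getLastD_val (v : Int) :
    ∀ (r : List (Int × Int)) (d : Int × Int), (∀ x ∈ r, x.2 = v) → d.2 = v →
      (r.getLastD d).2 = v := by
  intro r
  induction r with
  | nil => intro d _ hd; simpa using hd
  | cons x r' ih =>
    intro d hr _
    rw [List.getLastD_cons]
    exact ih x (fun y hy => hr y (by simp [hy])) (hr x (by simp))

-- chain of adjacent-distinct run values
theorem grp_chain : ∀ (n : Nat) (xs : List (Int × Int)), xs.length ≤ n →
    List.IsChain (fun a b => headVal a ≠ headVal b) (grp xs) := by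
  intro n
  induction n with
  | zero =>
    intro xs h
    have : xs = [] := List.length_eq_zero_iff.mp (Nat.le_zero.mp h)
    subst this; simp [grp]
  | succ n ih =>
    intro xs h
    cases xs with
    | nil => simp [grp]
    | cons p ps =>
      rw [grp]
      rw [List.isChain_cons']
      constructor
      · intro b hb
        cases hrest : ps.dropWhile (fun x => x.2 == p.2) with
        | nil => rw [hrest] at hb; simp [grp] at hb
        | cons x t =>
          rw [hrest] at hb
          rw [grp] at hb
          simp only [List.head?_cons, Option.mem_def, Option.some.injEq] at hb
          subst hb
          have := dropWhile_head_false _ ps x t hrest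
          simp only [headVal, List.headD_cons]
          intro hcon
          simp at this
          exact this hcon.symm
      · exact ih _ (Nat.le_trans (List.length_dropWhile_le _ _) (by simpa using h))

-- mkGroups equals grp
theorem mk_run (v : Int) :
    ∀ (r : List (Int × Int)) (bs : List (List (Int × Int))) (g : List (Int × Int)),
      (g.getLastD (0, 0)).2 = v → (∀ x ∈ r, x.2 = v) →
      List.foldl
        (fun gs p =>
          match gs.getLast? with
          | some g =>
              if (g.getLastD (0, 0)).2 = p.2 then gs.dropLast ++ [g ++ [p]] else gs ++ [[p]]
          | none => [[p]])
        (bs ++ [g]) r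
        = bs ++ [g ++ r] := by
  intro r
  induction r with
  | nil => intro bs g _ _; simp
  | cons x r' ih =>
    intro bs g hg hr
    have hx : x.2 = v := hr x (by simp)
    simp only [List.foldl_cons]
    simp only [List.getLast?_concat]
    rw [if_pos (by rw [hg, hx]), List.dropLast_concat]
    rw [ih bs (g ++ [x]) (by simpa using hx) (fun y hy => hr y (by simp [hy]))]
    simp

theorem mk_main : ∀ (n : Nat) (xs : List (Int × Int)), xs.length ≤ n →
    ∀ (bs : List (List (Int × Int))) (g : List (Int × Int)),
      (∀ x ∈ xs.head?, x.2 ≠ (g.getLastD (0, 0)).2) →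
      List.foldl
        (fun gs p =>
          match gs.getLast? with
          | some g =>
              if (g.getLastD (0, 0)).2 = p.2 then gs.dropLast ++ [g ++ [p]] else gs ++ [[p]]
          | none => [[p]])
        (bs ++ [g]) xs
        = (bs ++ [g]) ++ grp xs := by
  intro n
  induction n with
  | zero =>
    intro xs h bs g _
    have : xs = [] := List.length_eq_zero_iff.mp (Nat.le_zero.mp h)
    subst this; simp [grp]
  | succ n ih =>
    intro xs h bs g hhead
    cases xs with
    | nil => simp [grp]
    | cons p ps =>
      have hne : p.2 ≠ (g.getLastD (0, 0)).2 := hhead p (by simp)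
      simp only [List.foldl_cons, List.getLast?_concat]
      rw [if_neg (by intro hc; exact hne hc.symm)]
      have hsplit : ps = ps.takeWhile (fun x => x.2 == p.2) ++ ps.dropWhile (fun x => x.2 == p.2) :=
        (List.takeWhile_append_dropWhile (p := fun x => x.2 == p.2) (l := ps)).symm
      rw [show (bs ++ [g]) ++ [[p]] = (bs ++ [g]) ++ [[p]] from rfl]
      conv_lhs => rw [hsplit]
      rw [List.foldl_append]
      rw [mk_run p.2 _ (bs ++ [g]) [p] (by simp)
        (fun y hy => by simpa using List.mem_takeWhile_imp hy)]
      simp only [List.singleton_append]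
      rw [ih _ (Nat.le_trans (List.length_dropWhile_le _ _) (by simpa using h))
        (bs ++ [g]) (p :: ps.takeWhile (fun x => x.2 == p.2))
        ?_]
      · rw [grp]; simp
      · intro x hx
        cases hrest : ps.dropWhile (fun x => x.2 == p.2) with
        | nil => rw [hrest] at hx; simp at hx
        | cons y t =>
          rw [hrest] at hx
          simp only [List.head?_cons, Option.mem_def, Option.some.injEq] at hx
          subst hx
          have hf := dropWhile_head_false _ ps y t hrest
          simp at hf
          have : ((p :: ps.takeWhile (fun x => x.2 == p.2)).getLastD (0, 0)).2 = p.2 := by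
            rw [List.getLastD_cons]
            exact getLastD_val p.2 _ p
              (fun z hz => by simpa using List.mem_takeWhile_imp hz) rfl
          rw [this]
          exact hf

theorem mkGroups_eq_grp (points : List (Int × Int)) : mkGroups points = grp points := by
  cases points with
  | nil => simp [mkGroups, grp]
  | cons p ps =>
    unfold mkGroups
    simp only [List.foldl_cons]
    have h0 : (match ([] : List (List (Int × Int))).getLast? with
      | some g => if (g.getLastD (0, 0)).2 = p.2 then ([] : List (List (Int × Int))).dropLast ++ [g ++ [p]] else [] ++ [[p]]
      | none => [[p]]) = [[p]] := by simp
    rw [h0]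
    have hsplit : ps = ps.takeWhile (fun x => x.2 == p.2) ++ ps.dropWhile (fun x => x.2 == p.2) :=
      (List.takeWhile_append_dropWhile (p := fun x => x.2 == p.2) (l := ps)).symm
    conv_lhs => rw [hsplit]
    rw [List.foldl_append]
    rw [show ([[p]] : List (List (Int × Int))) = [] ++ [[p]] from rfl]
    rw [mk_run p.2 _ [] [p] (by simp)
      (fun y hy => by simpa using List.mem_takeWhile_imp hy)]
    simp only [List.singleton_append]
    rw [mk_main (ps.dropWhile (fun x => x.2 == p.2)).length _ le_rfl
      [] (p :: ps.takeWhile (fun x => x.2 == p.2)) ?_]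
    · rw [grp]; simp
    · intro x hx
      cases hrest : ps.dropWhile (fun x => x.2 == p.2) with
      | nil => rw [hrest] at hx; simp at hx
      | cons y t =>
        rw [hrest] at hx
        simp only [List.head?_cons, Option.mem_def, Option.some.injEq] at hx
        subst hx
        have hf := dropWhile_head_false _ ps y t hrest
        simp at hf
        have : ((p :: ps.takeWhile (fun x => x.2 == p.2)).getLastD (0, 0)).2 = p.2 := by
          rw [List.getLastD_cons]
          exact getLastD_val p.2 _ p
            (fun z hz => by simpa using List.mem_takeWhile_imp hz) rfl
        rw [this]
        exact hf

-- A's state machine, at a run boundary, equals the group-level model.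
theorem loopA_emit : ∀ (n : Nat) (rest : List (Int × Int)), rest.length ≤ n →
    ∀ (q : Int × Int) (lm : List (Int × Int)),
      (∀ x ∈ rest.head?, x.2 ≠ q.2) →
      ((pairLoop stepA (some q) (lm, []) rest).1 = lm ++ emitRuns q.2 none (grp rest))
      ∧ (∀ cs, cs ≠ [] → (∀ x ∈ cs, x.2 = q.2) →
          (pairLoop stepA (some q) (lm, cs) rest).1 = lm ++ emitRuns q.2 (some cs) (grp rest)) := by
  intro n
  induction n with
  | zero =>
    intro rest h q lm _
    have : rest = [] := List.length_eq_zero_iff.mp (Nat.le_zero.mp h)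
    subst this
    exact ⟨by simp [pairLoop, grp, emitRuns], fun cs _ _ => by simp [pairLoop, grp, emitRuns]⟩
  | succ n ih =>
    intro rest h q lm hhead
    cases rest with
    | nil =>
      exact ⟨by simp [pairLoop, grp, emitRuns], fun cs _ _ => by simp [pairLoop, grp, emitRuns]⟩
    | cons p ps =>
      have hv : p.2 ≠ q.2 := hhead p (by simp)
      have hrall : ∀ x ∈ ps.takeWhile (fun x => x.2 == p.2), x.2 = p.2 :=
        fun y hy => by simpa using List.mem_takeWhile_imp hy
      have hsplit : ps = ps.takeWhile (fun x => x.2 == p.2) ++ ps.dropWhile (fun x => x.2 == p.2) :=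
        (List.takeWhile_append_dropWhile (p := fun x => x.2 == p.2) (l := ps)).symm
      have hlast : ((ps.takeWhile (fun x => x.2 == p.2)).getLastD p).2 = p.2 :=
        getLastD_val p.2 _ p hrall rfl
      have hlen : (ps.dropWhile (fun x => x.2 == p.2)).length ≤ n :=
        Nat.le_trans (List.length_dropWhile_le _ _) (by simpa using h)
      have hdrophead : ∀ x ∈ (ps.dropWhile (fun x => x.2 == p.2)).head?, x.2 ≠ p.2 := by
        intro x hx
        cases hrest : ps.dropWhile (fun x => x.2 == p.2) with
        | nil => rw [hrest] at hx; simp at hx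
        | cons y t =>
          rw [hrest] at hx
          simp only [List.head?_cons, Option.mem_def, Option.some.injEq] at hx
          subst hx
          have hf := dropWhile_head_false _ ps y t hrest
          simp at hf; simpa using hf
      have hdrophead' : ∀ x ∈ (ps.dropWhile (fun x => x.2 == p.2)).head?,
          x.2 ≠ ((ps.takeWhile (fun x => x.2 == p.2)).getLastD p).2 := by
        intro x hx; rw [hlast]; exact hdrophead x hx
      have ihd := ih (ps.dropWhile (fun x => x.2 == p.2)) hlen
        ((ps.takeWhile (fun x => x.2 == p.2)).getLastD p)
      have hgrp : grp (p :: ps)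
          = (p :: ps.takeWhile (fun x => x.2 == p.2)) :: grp (ps.dropWhile (fun x => x.2 == p.2)) := by
        rw [grp]
      by_cases hqp : q.2 < p.2
      · -- rise into the new run
        have hrise : ∀ lm' cs', (pairLoop stepA (some q) (lm', cs') (p :: ps)).1
            = lm' ++ emitRuns p.2 (some (p :: ps.takeWhile (fun x => x.2 == p.2)))
                (grp (ps.dropWhile (fun x => x.2 == p.2))) := by
          intro lm' cs'
          have hstep : stepA (lm', cs') (some q) p = (lm', [p]) := by
            simp [stepA, hqp]
          simp only [pairLoop, hstep]
          conv_lhs => rw [hsplit]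
          rw [runA_append p.2 _ _ p lm' [p] rfl hrall (by simp) (by simp)]
          simp only [List.singleton_append]
          rw [(ihd lm' hdrophead').2 (p :: ps.takeWhile (fun x => x.2 == p.2)) (by simp)
            (by intro y hy; rw [hlast]
                rcases List.mem_cons.mp hy with h | h
                · simp [h]
                · exact hrall y h)]
          rw [hlast]
        constructor
        · rw [hrise lm [], hgrp]
          rw [show emitRuns q.2 none
              ((p :: ps.takeWhile (fun x => x.2 == p.2)) :: grp (ps.dropWhile (fun x => x.2 == p.2)))
              = emitRuns p.2 (some (p :: ps.takeWhile (fun x => x.2 == p.2)))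
                (grp (ps.dropWhile (fun x => x.2 == p.2))) from by
            rw [emitRuns]
            rw [if_pos (by simpa [headVal] using hqp)]
            simp [headVal]]
        · intro cs _ _
          rw [hrise lm cs, hgrp]
          rw [show emitRuns q.2 (some cs)
              ((p :: ps.takeWhile (fun x => x.2 == p.2)) :: grp (ps.dropWhile (fun x => x.2 == p.2)))
              = emitRuns p.2 (some (p :: ps.takeWhile (fun x => x.2 == p.2)))
                (grp (ps.dropWhile (fun x => x.2 == p.2))) from by
            rw [emitRuns]
            rw [if_pos (by simpa [headVal] using hqp)]
            simp [headVal]]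
      · -- descent (or start): no rise
        have hskip : ∀ lm', (pairLoop stepA (some p) (lm', []) ps).1
            = lm' ++ emitRuns p.2 none (grp (ps.dropWhile (fun x => x.2 == p.2))) := by
          intro lm'
          conv_lhs => rw [hsplit]
          rw [runA_skip p.2 _ _ p lm' rfl hrall]
          rw [(ihd lm' hdrophead').1, hlast]
        constructor
        · have hstep : stepA (lm, []) (some q) p = (lm, []) := by
            simp [stepA, hqp]
          simp only [pairLoop, hstep]
          rw [hskip lm, hgrp]
          rw [show emitRuns q.2 none
              ((p :: ps.takeWhile (fun x => x.2 == p.2)) :: grp (ps.dropWhile (fun x => x.2 == p.2)))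
              = emitRuns p.2 none (grp (ps.dropWhile (fun x => x.2 == p.2))) from by
            rw [emitRuns]
            rw [if_neg (by simpa [headVal] using hqp)]
            simp [headVal]]
        · intro cs hne hcs
          obtain ⟨l, hl⟩ : ∃ l, cs.getLast? = some l := by
            cases hc : cs.getLast? with
            | none => exact absurd (List.getLast?_eq_none_iff.mp hc) hne
            | some l => exact ⟨l, rfl⟩
          have hlv : l.2 = q.2 := hcs l (List.mem_of_getLast? hl)
          have hstep : stepA (lm, cs) (some q) p = (lm ++ [midG cs], []) := by
            simp only [stepA, midG, hl]
            rw [if_neg (by simpa using hqp)]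
            rw [if_neg (by rw [hlv]; exact fun hc => hv hc.symm)]
          simp only [pairLoop, hstep]
          rw [hskip (lm ++ [midG cs]), hgrp]
          rw [show emitRuns q.2 (some cs)
              ((p :: ps.takeWhile (fun x => x.2 == p.2)) :: grp (ps.dropWhile (fun x => x.2 == p.2)))
              = [midG cs] ++ emitRuns p.2 none (grp (ps.dropWhile (fun x => x.2 == p.2))) from by
            rw [emitRuns]
            rw [if_neg (by simpa [headVal] using hqp)]
            simp [headVal]]
          simp

theorem trips_drop (a b : List (Int × Int)) (rest : List (List (Int × Int)))
    (h : ¬ headVal a < headVal b) : trips (a :: b :: rest) = trips (b :: rest) := by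
  cases rest with
  | nil => simp [trips]
  | cons c r =>
    rw [trips]
    rw [if_neg (by intro hc; exact h hc.1)]
    simp

-- the group-level model equals B's neighbour test
theorem emit_trips : ∀ (gs : List (List (Int × Int))),
    (∀ pg, List.IsChain (fun a b => headVal a ≠ headVal b) (pg :: gs) →
        emitRuns (headVal pg) none gs = trips (pg :: gs))
    ∧ (∀ pre pg, headVal pre < headVal pg →
        List.IsChain (fun a b => headVal a ≠ headVal b) (pg :: gs) →
        emitRuns (headVal pg) (some pg) gs = trips (pre :: pg :: gs)) := by
  intro gs
  induction gs with
  | nil =>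
    exact ⟨fun pg _ => by simp [emitRuns, trips], fun pre pg _ _ => by simp [emitRuns, trips]⟩
  | cons g rest ih =>
    obtain ⟨ihQ, ihP⟩ := ih
    constructor
    · intro pg hch
      rw [List.isChain_cons'] at hch
      obtain ⟨hne, hch'⟩ := hch
      by_cases hlt : headVal pg < headVal g
      · rw [show emitRuns (headVal pg) none (g :: rest) = emitRuns (headVal g) (some g) rest from by
          rw [emitRuns]; rw [if_pos hlt]]
        exact ihP pg g hlt hch'
      · rw [show emitRuns (headVal pg) none (g :: rest) = emitRuns (headVal g) none rest from by
          rw [emitRuns]; rw [if_neg hlt]; rfl]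
        rw [ihQ g hch', trips_drop pg g rest hlt]
    · intro pre pg hpre hch
      rw [List.isChain_cons'] at hch
      obtain ⟨hne, hch'⟩ := hch
      have hnepg : headVal pg ≠ headVal g := hne g (by simp)
      by_cases hlt : headVal pg < headVal g
      · rw [show emitRuns (headVal pg) (some pg) (g :: rest) = emitRuns (headVal g) (some g) rest from by
          rw [emitRuns]; rw [if_pos hlt]]
        rw [ihP pg g hlt hch']
        rw [trips]
        rw [if_neg (by intro hc; exact absurd hc.2 (not_lt.mpr (le_of_lt hlt)))]
        simp
      · have hglt : headVal g < headVal pg :=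
          lt_of_le_of_ne (not_lt.mp hlt) (fun hc => hnepg hc.symm)
        rw [show emitRuns (headVal pg) (some pg) (g :: rest)
            = [midG pg] ++ emitRuns (headVal g) none rest from by
          rw [emitRuns]; rw [if_neg hlt]]
        rw [ihQ g hch']
        rw [trips]
        rw [if_pos ⟨hpre, hglt⟩]
        rw [trips_drop pg g rest hlt]

-- B's zipped filterMap equals the triple recursion
theorem filterZip_trips : ∀ (n : Nat) (gs : List (List (Int × Int))), gs.length ≤ n →
    ((gs.zip gs.tail).zip gs.tail.tail).filterMap
      (fun t =>
        if (t.1.1.headD (0, 0)).2 < (t.1.2.headD (0, 0)).2 ∧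
           (t.2.headD (0, 0)).2 < (t.1.2.headD (0, 0)).2
        then some (t.1.2.getD (t.1.2.length / 2) (0, 0))
        else none)
      = trips gs := by
  intro n
  induction n with
  | zero =>
    intro gs h
    have : gs = [] := List.length_eq_zero_iff.mp (Nat.le_zero.mp h)
    subst this; simp [trips]
  | succ n ih =>
    intro gs h
    match gs with
    | [] => simp [trips]
    | [a] => simp [trips]
    | [a, b] => simp [trips]
    | a :: b :: c :: r =>
      simp only [List.tail_cons, List.zip_cons_cons]
      have hrec := ih (b :: c :: r) (by simp at h ⊢; omega)
      simp only [List.tail_cons, List.zip_cons_cons] at hrec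
      rw [trips]
      by_cases hcond : headVal a < headVal b ∧ headVal c < headVal b
      · rw [List.filterMap_cons_some (by rw [if_pos (by simpa [headVal] using hcond)])]
        rw [hrec, if_pos hcond]
        simp [midG]
      · rw [List.filterMap_cons_none (by rw [if_neg (by simpa [headVal] using hcond)])]
        rw [hrec, if_neg hcond]
        simp

theorem bridgeB (points : List (Int × Int)) :
    find_local_maxima_alt points = trips (grp points) := by
  simp only [find_local_maxima_alt]
  rw [mkGroups_eq_grp]
  exact filterZip_trips (grp points).length _ le_rfl

theorem A_eq_trips (points : List (Int × Int)) :
    find_local_maxima points = trips (grp points) := by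
  rw [bridgeA]
  cases points with
  | nil => simp [pairLoop, grp, trips]
  | cons p ps =>
    have hstep : stepA ([], []) none p = ([], []) := by simp [stepA]
    simp only [pairLoop, hstep]
    have hrall : ∀ x ∈ ps.takeWhile (fun x => x.2 == p.2), x.2 = p.2 :=
      fun y hy => by simpa using List.mem_takeWhile_imp hy
    have hsplit : ps = ps.takeWhile (fun x => x.2 == p.2) ++ ps.dropWhile (fun x => x.2 == p.2) :=
      (List.takeWhile_append_dropWhile (p := fun x => x.2 == p.2) (l := ps)).symm
    have hlast : ((ps.takeWhile (fun x => x.2 == p.2)).getLastD p).2 = p.2 :=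
      getLastD_val p.2 _ p hrall rfl
    have hdrophead' : ∀ x ∈ (ps.dropWhile (fun x => x.2 == p.2)).head?,
        x.2 ≠ ((ps.takeWhile (fun x => x.2 == p.2)).getLastD p).2 := by
      intro x hx
      rw [hlast]
      cases hrest : ps.dropWhile (fun x => x.2 == p.2) with
      | nil => rw [hrest] at hx; simp at hx
      | cons y t =>
        rw [hrest] at hx
        simp only [List.head?_cons, Option.mem_def, Option.some.injEq] at hx
        subst hx
        have hf := dropWhile_head_false _ ps y t hrest
        simp at hf; simpa using hf
    conv_lhs => rw [hsplit]
    rw [runA_skip p.2 _ _ p [] rfl hrall]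
    rw [(loopA_emit (ps.dropWhile (fun x => x.2 == p.2)).length _ le_rfl
      ((ps.takeWhile (fun x => x.2 == p.2)).getLastD p) [] hdrophead').1]
    rw [hlast]
    have hch := grp_chain (p :: ps).length (p :: ps) le_rfl
    rw [grp] at hch
    have htr := (emit_trips (grp (ps.dropWhile (fun x => x.2 == p.2)))).1
      (p :: ps.takeWhile (fun x => x.2 == p.2)) hch
    simp only [headVal, List.headD_cons] at htr
    rw [List.nil_append, htr, grp]

-- ===== VERDICT (by name: the statement is the Claim_ definition above) =====
theorem find_local_maxima_spec : Claim_equal_find_local_maxima := by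
  intro points _
  unfold Spec_find_local_maxima
  rw [A_eq_trips, bridgeB]
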